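-- pv_equiv track=rewrite | github.com/gabriel-piedade95/Pesquisa_em_Biologia | calculos_estados.py | bacias_arvores
-- ===== SOURCE A (Python) =====
-- def bacias_arvores(lista, raiz):
--
-- 	if raiz not in lista:
-- 		return [raiz]
--
-- 	aux = [raiz]
-- 	for i in range(0, len(lista)):
-- 		if lista[i] == raiz and i not in aux:
-- 			aux += bacias_arvores(lista, i)
--
-- 	return aux
-- ===== SOURCE B (Python) =====
-- def bacias_arvores(lista, raiz):
--     filhos = {}
--     for i, v in enumerate(lista):
--         filhos.setdefault(v, []).append(i)
--
--     def dfs(r):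
--         ramo = [r]
--         for i in filhos.get(r, []):
--             if i != r:
--                 ramo.extend(dfs(i))
--         return ramo
--
--     return dfs(raiz)
-- ===== Notes on version B (the rewrite author's own statement) =====
-- stated objective: alternative
-- what changed: B builds a value-to-child-indices dict once and does a plain preorder DFS over actual children, replacing A's per-node rescan of the whole list and per-node membership tests on the accumulator (better worst case, but not measurably faster on the random timing inputs, where A returns after one scan).
import Mathlib
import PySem

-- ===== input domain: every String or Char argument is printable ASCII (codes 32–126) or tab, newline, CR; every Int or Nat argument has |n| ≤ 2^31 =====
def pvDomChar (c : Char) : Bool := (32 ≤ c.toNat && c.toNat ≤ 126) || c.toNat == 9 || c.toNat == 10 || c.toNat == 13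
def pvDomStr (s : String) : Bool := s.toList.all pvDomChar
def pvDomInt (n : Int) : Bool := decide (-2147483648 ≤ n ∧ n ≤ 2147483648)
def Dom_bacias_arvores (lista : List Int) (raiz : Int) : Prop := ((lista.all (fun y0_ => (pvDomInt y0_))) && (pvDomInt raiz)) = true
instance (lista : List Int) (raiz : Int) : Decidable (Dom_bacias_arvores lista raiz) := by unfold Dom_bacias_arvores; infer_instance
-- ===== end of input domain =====

-- B replaces A's per-node rescan of the whole list (plus linear membership tests on the
-- accumulator) by a child-index dict built once and a plain preorder DFS over it.
-- Both recursions are ported with fuel lista.length + 2, never exhausted inside Pre_.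

-- ===== PORT A =====
def pvGoA (lista : List Int) : Nat → Int → List Int
  | 0, _ => []
  | f+1, raiz =>
    if raiz ∉ lista then [raiz]
    else
      (PySem.List.pyRange 0 (lista.length : Int) 1).foldl
        (fun aux i =>
          if PySem.List.pyGetD lista i 0 = raiz ∧ i ∉ aux then aux ++ pvGoA lista f i
          else aux) [raiz]

def bacias_arvores (lista : List Int) (raiz : Int) : List Int :=
  pvGoA lista (lista.length + 2) raiz

-- ===== PORT B =====
def pvFilhos (lista : List Int) : PySem.Dict Int (List Int) :=
  (PySem.List.enumerate lista).foldl (fun d p => d.modify p.2 [] (· ++ [p.1])) PySem.Dict.empty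

def pvGoB (filhos : PySem.Dict Int (List Int)) : Nat → Int → List Int
  | 0, _ => []
  | f+1, r =>
    (filhos.getD r []).foldl
      (fun ramo i => if i ≠ r then ramo ++ pvGoB filhos f i else ramo) [r]

def bacias_arvores_alt (lista : List Int) (raiz : Int) : List Int :=
  pvGoB (pvFilhos lista) (lista.length + 2) raiz

-- ===== PRECONDITION & SPEC =====
-- one parent-pointer step: follow lista at v when v is an in-range index
def pvStep (lista : List Int) (v : Int) : Option Int :=
  if 0 ≤ v ∧ v < lista.length then some (PySem.List.pyGetD lista v 0) else none

def pvIter (lista : List Int) : Nat → Int → Option Int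
  | 0, v => some v
  | k+1, v => (pvIter lista k v).bind (pvStep lista)

-- Pre_ excludes exactly the inputs on which A recurses forever (Python raises RecursionError):
-- those where raiz lies on a parent-pointer cycle of length ≥ 2.
def Pre_bacias_arvores (lista : List Int) (raiz : Int) : Prop :=
  pvIter lista 1 raiz = some raiz ∨
    ∀ m, m < lista.length + 1 → ¬(2 ≤ m ∧ pvIter lista m raiz = some raiz)

instance (lista : List Int) (raiz : Int) : Decidable (Pre_bacias_arvores lista raiz) := by
  unfold Pre_bacias_arvores; infer_instance

def pvWitness_bacias_arvores : List Int × Int := ([-1, 0, 0, 1], 0)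

def Spec_bacias_arvores (lista : List Int) (raiz : Int) (out : List Int) : Prop := out = bacias_arvores_alt lista raiz
instance (lista : List Int) (raiz : Int) (out : List Int) : Decidable (Spec_bacias_arvores lista raiz out) := by unfold Spec_bacias_arvores; infer_instance

-- ===== CLAIM (what is proved, stated in full; the proofs are below) =====
def Claim_equal_bacias_arvores : Prop := ∀ (lista : List Int) (raiz : Int), Dom_bacias_arvores lista raiz → Pre_bacias_arvores lista raiz → Spec_bacias_arvores lista raiz (bacias_arvores lista raiz)

-- ===== LEMMAS AND PROOFS =====

-- "no parent-pointer cycle of length ≥ 2 through r" (unbounded form, used by the induction)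
def pvNoCyc (lista : List Int) (r : Int) : Prop :=
  ¬ ∃ k, 1 ≤ k ∧ pvIter lista k r = some r ∧ pvIter lista 1 r ≠ some r

theorem pvIter_add (lista : List Int) (a b : Nat) (v : Int) :
    pvIter lista (a + b) v = (pvIter lista a v).bind (pvIter lista b) := by
  induction b with
  | zero => cases pvIter lista a v <;> simp [pvIter]
  | succ b ih =>
    have : a + (b + 1) = (a + b) + 1 := by omega
    rw [this]
    show (pvIter lista (a + b) v).bind (pvStep lista) = _
    rw [ih]
    cases pvIter lista a v <;> simp [pvIter]

theorem pvIter_one (lista : List Int) (v : Int) : pvIter lista 1 v = pvStep lista v := by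
  simp [pvIter]

theorem pvIter_self_loop (lista : List Int) (r : Int) (h : pvIter lista 1 r = some r) :
    ∀ j, pvIter lista j r = some r := by
  intro j
  induction j with
  | zero => simp [pvIter]
  | succ j ih =>
    show (pvIter lista j r).bind (pvStep lista) = some r
    rw [ih]
    rw [pvIter_one] at h
    simpa using h




-- membership in a conditional-append fold
theorem pvFoldMem {α β : Type} (g : β → List α) (Q : β → Prop) [DecidablePred Q]
    (R : β → List α → Prop) [∀ b l, Decidable (R b l)] :
    ∀ (l : List β) (init : List α) (e : α),
      e ∈ l.foldl (fun acc i => if Q i ∧ R i acc then acc ++ g i else acc) init →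
      e ∈ init ∨ ∃ i ∈ l, Q i ∧ e ∈ g i := by
  intro l
  induction l with
  | nil => intro init e h; exact Or.inl h
  | cons i l ih =>
    intro init e h
    simp only [List.foldl_cons] at h
    rcases ih _ e h with h' | ⟨j, hj, hQ, he⟩
    · by_cases hc : Q i ∧ R i init
      · rw [if_pos hc] at h'
        rcases List.mem_append.1 h' with h'' | h''
        · exact Or.inl h''
        · exact Or.inr ⟨i, List.mem_cons_self .., hc.1, h''⟩
      · rw [if_neg hc] at h'
        exact Or.inl h'
    · exact Or.inr ⟨j, List.mem_cons_of_mem _ hj, hQ, he⟩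

-- every element of A's result can parent-step back to the call's root
theorem pvGoA_mem_iter (lista : List Int) :
    ∀ (f : Nat) (c e : Int), e ∈ pvGoA lista f c → ∃ k, pvIter lista k e = some c := by
  intro f
  induction f with
  | zero => intro c e h; simp [pvGoA] at h
  | succ f ih =>
    intro c e h
    unfold pvGoA at h
    by_cases hm : c ∉ lista
    · rw [if_pos hm] at h
      simp at h
      exact ⟨0, by simp [pvIter, h]⟩
    · rw [if_neg hm] at h
      rcases pvFoldMem (pvGoA lista f) (fun i => PySem.List.pyGetD lista i 0 = c)
          (fun i acc => i ∉ acc) _ _ e h with h' | ⟨i, hi, hQ, he⟩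
      · simp at h'
        exact ⟨0, by simp [pvIter, h']⟩
      · rcases PySem.List.mem_pyRange_one.1 hi with ⟨h0, hlt⟩
        rcases ih i e he with ⟨k, hk⟩
        refine ⟨k + 1, ?_⟩
        show (pvIter lista k e).bind (pvStep lista) = some c
        rw [hk]
        have hstep : pvStep lista i = some c := by
          rw [pvStep, if_pos ⟨h0, hlt⟩, hQ]
        simpa using hstep

-- a child index of r cannot occur inside the subtree of a different (≠ r) child of r
theorem pvNotMemChild (lista : List Int) (r : Int) (hno : pvNoCyc lista r)
    (c i : Int) (hlc : pvStep lista c = some r) (hcr : c ≠ r)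
    (hir : pvStep lista i = some r) (hci : c ≠ i) (f : Nat) :
    i ∉ pvGoA lista f c := by
  intro hmem
  rcases pvGoA_mem_iter lista f c i hmem with ⟨k, hk⟩
  cases k with
  | zero =>
    simp [pvIter] at hk
    exact hci hk.symm
  | succ k' =>
    -- pvIter (k'+1) i = some c, k := k'+1 ≥ 1
    have hk1 : pvIter lista 1 i = some r := by rw [pvIter_one]; exact hir
    have hsucc : pvIter lista (k' + 1 + 1) i = some r := by
      show (pvIter lista (k' + 1) i).bind (pvStep lista) = some r
      rw [hk]; simpa using hlc
    have hsplit : pvIter lista (k' + 1 + 1) i = pvIter lista (k' + 1) r := by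
      have h1 : k' + 1 + 1 = 1 + (k' + 1) := by omega
      rw [h1, pvIter_add, hk1]; simp
    have hcyc : pvIter lista (k' + 1) r = some r := by rw [← hsplit]; exact hsucc
    by_cases hsl : pvIter lista 1 r = some r
    · -- self-loop at r: then c would be r
      have hforall := pvIter_self_loop lista r hsl
      have : pvIter lista (k' + 1) i = pvIter lista k' r := by
        have h1 : k' + 1 = 1 + k' := by omega
        rw [h1, pvIter_add, hk1]; simp
      rw [this, hforall k'] at hk
      exact hcr (by simpa using hk.symm)
    · exact hno ⟨k' + 1, by omega, hcyc, hsl⟩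

-- pvNoCyc passes from a node to its (≠) children
theorem pvNoCyc_child (lista : List Int) (r i : Int) (hno : pvNoCyc lista r)
    (hir : pvStep lista i = some r) (hine : i ≠ r) : pvNoCyc lista i := by
  rintro ⟨k, hk1, hki, hk1i⟩
  have h1 : pvIter lista 1 i = some r := by rw [pvIter_one]; exact hir
  obtain ⟨k', rfl⟩ : ∃ k', k = k' + 1 := ⟨k - 1, by omega⟩
  have hsucc : pvIter lista (k' + 1 + 1) i = some r := by
    show (pvIter lista (k' + 1) i).bind (pvStep lista) = some r
    rw [hki]; simpa using hir
  have hsplit : pvIter lista (k' + 1 + 1) i = pvIter lista (k' + 1) r := by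
    have he : k' + 1 + 1 = 1 + (k' + 1) := by omega
    rw [he, pvIter_add, h1]; simp
  have hcyc : pvIter lista (k' + 1) r = some r := by rw [← hsplit]; exact hsucc
  by_cases hsl : pvIter lista 1 r = some r
  · have hforall := pvIter_self_loop lista r hsl
    have : pvIter lista (k' + 1) i = pvIter lista k' r := by
      have he : k' + 1 = 1 + k' := by omega
      rw [he, pvIter_add, h1]; simp
    rw [this, hforall k'] at hki
    exact hine (by simpa using hki.symm)
  · exact hno ⟨k' + 1, by omega, hcyc, hsl⟩


def pvChildIdx (lista : List Int) (r : Int) : List Int :=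
  ((PySem.List.enumerate lista).filter (fun p => p.2 == r)).map (fun p => p.1)

theorem pvFilhos_getD (lista : List Int) (r : Int) :
    (pvFilhos lista).getD r [] = pvChildIdx lista r := by
  have h := PySem.Dict.getD_foldl_modify_append
    (l := (PySem.List.enumerate lista).map (fun p => (p.2, p.1)))
    (d := PySem.Dict.empty) (c := r)
  rw [List.foldl_map] at h
  simp only [List.filter_map, Function.comp_def, List.map_map] at h
  unfold pvFilhos pvChildIdx
  rw [h]
  simp [PySem.Dict.getD_empty]

theorem pvFoldIf {α β : Type} (g : β → List α) (P : β → Prop) [DecidablePred P] :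
    ∀ (l : List β) (acc : List α),
      l.foldl (fun acc x => if P x then acc ++ g x else acc) acc
        = acc ++ (l.filter (fun x => decide (P x))).flatMap g := by
  intro l
  induction l with
  | nil => intro acc; simp
  | cons x l ih =>
    intro acc
    by_cases h : P x
    · simp only [List.foldl_cons, if_pos h, List.filter_cons, decide_eq_true h]
      rw [ih]
      simp
    · simp only [List.foldl_cons, if_neg h, List.filter_cons, decide_eq_false h]
      rw [ih]
      simp

theorem pvGoA_fold (lista : List Int) (r : Int) (f : Nat) (hno : pvNoCyc lista r) :
    ∀ (l : List (Int × Int)) (C : List Int),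
      (∀ p ∈ l, ∃ k : Nat, k < lista.length ∧ p.1 = (k : Int) ∧ p.2 = PySem.List.pyGetD lista (k : Int) 0) →
      l.Pairwise (fun p q => p.1 ≠ q.1) →
      (∀ c ∈ C, pvStep lista c = some r ∧ c ≠ r) →
      (∀ c ∈ C, ∀ p ∈ l, c ≠ p.1) →
      l.foldl (fun aux p => if p.2 = r ∧ p.1 ∉ aux then aux ++ pvGoA lista f p.1 else aux)
          ([r] ++ C.flatMap (pvGoA lista f))
        = [r] ++ ((C ++ ((l.filter (fun p => decide (p.2 = r))).map (fun p => p.1)).filter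
              (fun i => decide (i ≠ r))).flatMap (pvGoA lista f)) := by
  intro l
  induction l with
  | nil => intro C _ _ _ _; simp
  | cons p l ih =>
    intro C hgen hpw hC hdisj
    obtain ⟨k, hk, hp1, hp2⟩ := hgen p (List.mem_cons_self ..)
    have hgen' : ∀ q ∈ l, ∃ k : Nat, k < lista.length ∧ q.1 = (k : Int) ∧ q.2 = PySem.List.pyGetD lista (k : Int) 0 :=
      fun q hq => hgen q (List.mem_cons_of_mem _ hq)
    have hpw' := (List.pairwise_cons.1 hpw).2
    have hhead := (List.pairwise_cons.1 hpw).1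
    by_cases hpr : p.2 = r
    · by_cases hp1r : p.1 = r
      · -- self-child: p.1 = r already in the accumulator; skipped, and filtered out on the right
        simp only [List.foldl_cons, List.filter_cons, decide_eq_true hpr]
        rw [if_neg (by rintro ⟨-, hnin⟩; exact hnin (by simp [hp1r]))]
        rw [ih C hgen' hpw' hC (fun c hc q hq => hdisj c hc q (List.mem_cons_of_mem _ hq))]
        simp [hp1r]
      · -- genuine new child
        have hstep : pvStep lista p.1 = some r := by
          unfold pvStep
          rw [hp1, if_pos ⟨by positivity, by exact_mod_cast hk⟩]
          rw [← hp2, hpr]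
        have hnotin : p.1 ∉ [r] ++ C.flatMap (pvGoA lista f) := by
          intro hmem
          rcases List.mem_append.1 hmem with hh | hh
          · exact hp1r (by simpa using hh)
          · rcases List.mem_flatMap.1 hh with ⟨c, hcC, hcmem⟩
            rcases hC c hcC with ⟨hcs, hcr⟩
            exact pvNotMemChild lista r hno c p.1 hcs hcr hstep
              (hdisj c hcC p (List.mem_cons_self ..)) f hcmem
        simp only [List.foldl_cons, List.filter_cons, decide_eq_true hpr]
        rw [if_pos ⟨hpr, hnotin⟩]
        have hacc : ([r] ++ C.flatMap (pvGoA lista f)) ++ pvGoA lista f p.1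
            = [r] ++ (C ++ [p.1]).flatMap (pvGoA lista f) := by
          simp
        rw [hacc]
        rw [ih (C ++ [p.1])
          hgen' hpw'
          (by
            intro c hc
            rcases List.mem_append.1 hc with hh | hh
            · exact hC c hh
            · simp at hh; subst hh; exact ⟨hstep, hp1r⟩)
          (by
            intro c hc q hq
            rcases List.mem_append.1 hc with hh | hh
            · exact hdisj c hh q (List.mem_cons_of_mem _ hq)
            · simp at hh; subst hh; exact hhead q hq)]
        simp [hp1r]
    · -- value ≠ r: no-op, filtered out
      simp only [List.foldl_cons, List.filter_cons, decide_eq_false hpr]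
      rw [if_neg (by rintro ⟨hc, -⟩; exact hpr hc)]
      exact ih C hgen' hpw' hC (fun c hc q hq => hdisj c hc q (List.mem_cons_of_mem _ hq))

theorem pvChildIdx_eq (lista : List Int) (r : Int) :
    pvChildIdx lista r
      = ((PySem.List.enumerate lista).filter (fun p => decide (p.2 = r))).map (fun p => p.1) := by
  unfold pvChildIdx
  congr 1

theorem pvGo_eq (lista : List Int) :
    ∀ (f : Nat) (r : Int), pvNoCyc lista r → pvGoA lista f r = pvGoB (pvFilhos lista) f r := by
  intro f
  induction f with
  | zero => intro r _; simp [pvGoA, pvGoB]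
  | succ f ih =>
    intro r hno
    have hB : pvGoB (pvFilhos lista) (f + 1) r
        = [r] ++ ((pvChildIdx lista r).filter (fun i => decide (i ≠ r))).flatMap
            (pvGoB (pvFilhos lista) f) := by
      show ((pvFilhos lista).getD r []).foldl _ [r] = _
      rw [pvFilhos_getD, pvFoldIf (pvGoB (pvFilhos lista) f) (fun i => i ≠ r)]
    by_cases hmem : r ∉ lista
    · unfold pvGoA
      rw [if_pos hmem, hB]
      have hempty : pvChildIdx lista r = [] := by
        unfold pvChildIdx
        rw [List.filter_eq_nil_iff.2 ?_]
        · simp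
        · intro p hp
          rcases (PySem.List.mem_enumerate_iff _ _ _).1 hp with ⟨k, hk, rfl⟩
          simp only [beq_iff_eq]
          intro hEq
          exact hmem (hEq ▸ List.getElem_mem hk)
      rw [hempty]
      simp
    · unfold pvGoA
      rw [if_neg hmem]
      have henum := PySem.List.enumerate_eq_map_pyRange (xs := lista) (d := 0)
      have hA : (PySem.List.enumerate lista).foldl
            (fun aux p => if p.2 = r ∧ p.1 ∉ aux then aux ++ pvGoA lista f p.1 else aux) [r]
          = (PySem.List.pyRange 0 (lista.length : Int) 1).foldl
            (fun aux i => if PySem.List.pyGetD lista i 0 = r ∧ i ∉ aux then aux ++ pvGoA lista f i else aux) [r] := by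
        rw [henum, List.foldl_map]
        simp
      rw [← hA]
      have hfold := pvGoA_fold lista r f hno (PySem.List.enumerate lista) []
        (by
          intro p hp
          rcases (PySem.List.mem_enumerate_iff _ _ _).1 hp with ⟨k, hk, rfl⟩
          refine ⟨k, hk, by simp, ?_⟩
          simp [List.getD_eq_getElem?_getD, List.getElem?_eq_getElem hk]
        )
        ((PySem.List.pairwise_lt_enumerate (xs := lista) (s := 0)).imp (fun h => ne_of_lt h))
        (by intro c hc; simp at hc)
        (by intro c hc; simp at hc)
      simp only [List.flatMap_nil, List.append_nil, List.nil_append] at hfold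
      rw [hfold]
      rw [hB, pvChildIdx_eq]
      congr 1
      rw [List.flatMap_def, List.flatMap_def]
      congr 1
      apply List.map_congr_left
      intro i hi
      rcases List.mem_filter.1 hi with ⟨hi', hir⟩
      have hir' : i ≠ r := by simpa using hir
      rcases List.mem_map.1 hi' with ⟨p, hpmem, rfl⟩
      rcases List.mem_filter.1 hpmem with ⟨hpe, hpr⟩
      rcases (PySem.List.mem_enumerate_iff _ _ _).1 hpe with ⟨k, hk, rfl⟩
      have hpr' : lista[k] = r := by simpa using hpr
      have hstep : pvStep lista ((0 : Int) + k, lista[k]).1 = some r := by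
        unfold pvStep
        simp only
        rw [if_pos ⟨by positivity, by omega⟩]
        simp [List.getD_eq_getElem?_getD, List.getElem?_eq_getElem hk, hpr']
      exact ih _ (pvNoCyc_child lista r _ hno hstep hir')

theorem pvPre_noCyc (lista : List Int) (raiz : Int)
    (hpre : Pre_bacias_arvores lista raiz) : pvNoCyc lista raiz := by
  rintro ⟨k, hk1, hkr, h1r⟩
  rcases hpre with h1 | hball
  · exact h1r h1
  · have hex : ∃ j, 1 ≤ j ∧ pvIter lista j raiz = some raiz := ⟨k, hk1, hkr⟩
    obtain ⟨hp1, hpiter⟩ := Nat.find_spec hex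
    have hmin : ∀ j, j < Nat.find hex → ¬(1 ≤ j ∧ pvIter lista j raiz = some raiz) :=
      fun j hj => Nat.find_min hex hj
    generalize hpg : Nat.find hex = p at hp1 hpiter hmin
    have hp2 : 2 ≤ p := by
      by_contra hlt
      have hp1' : p = 1 := by omega
      rw [hp1'] at hpiter
      exact h1r hpiter
    have hsome : ∀ j, j ≤ p → ∃ w, pvIter lista j raiz = some w := by
      intro j hj
      have hsplit : pvIter lista (j + (p - j)) raiz = some raiz := by
        rw [Nat.add_sub_cancel' hj]; exact hpiter
      rw [pvIter_add] at hsplit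
      cases h : pvIter lista j raiz with
      | none => rw [h] at hsplit; simp at hsplit
      | some w => exact ⟨w, rfl⟩
    have hrange : ∀ j, j < p → ∀ w, pvIter lista j raiz = some w → 0 ≤ w ∧ w < lista.length := by
      intro j hj w hw
      obtain ⟨u, hu⟩ := hsome (j + 1) (by omega)
      have hu' : (pvIter lista j raiz).bind (pvStep lista) = some u := hu
      rw [hw] at hu'
      simp at hu'
      unfold pvStep at hu'
      by_cases hc : 0 ≤ w ∧ w < lista.length
      · exact hc
      · rw [if_neg hc] at hu'; simp at hu'
    have key : ∀ a b, a < b → b < p → pvIter lista a raiz ≠ pvIter lista b raiz := by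
      intro a b hab hbp heq
      have h1 : pvIter lista (b + (p - b)) raiz = some raiz := by
        rw [Nat.add_sub_cancel' (le_of_lt hbp)]; exact hpiter
      rw [pvIter_add, ← heq, ← pvIter_add] at h1
      exact hmin (a + (p - b)) (by omega) ⟨by omega, h1⟩
    have hgnodup : ((List.range p).map (fun j => (pvIter lista j raiz).getD 0)).Nodup := by
      refine List.Nodup.map_on ?_ (List.nodup_range)
      intro a ha b hb heq
      rw [List.mem_range] at ha hb
      obtain ⟨wa, hwa⟩ := hsome a (by omega)
      obtain ⟨wb, hwb⟩ := hsome b (by omega)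
      have heq' : pvIter lista a raiz = pvIter lista b raiz := by
        rw [hwa, hwb] at heq ⊢
        simpa using heq
      rcases Nat.lt_trichotomy a b with h | h | h
      · exact absurd heq' (key a b h hb)
      · exact h
      · exact absurd heq'.symm (key b a h ha)
    have hsubset : ((List.range p).map (fun j => (pvIter lista j raiz).getD 0)).toFinset
        ⊆ Finset.Ico (0 : Int) (lista.length : Int) := by
      intro x hx
      rw [List.mem_toFinset] at hx
      rcases List.mem_map.1 hx with ⟨j, hj, rfl⟩
      rw [List.mem_range] at hj
      obtain ⟨w, hw⟩ := hsome j (le_of_lt hj)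
      rcases hrange j hj w hw with ⟨h0, hl⟩
      rw [hw]
      simp only [Option.getD_some]
      exact Finset.mem_Ico.2 ⟨h0, hl⟩
    have hple : p ≤ lista.length := by
      have h1 : ((List.range p).map (fun j => (pvIter lista j raiz).getD 0)).toFinset.card
          = p := by
        rw [List.toFinset_card_of_nodup hgnodup]
        simp
      have h2 := Finset.card_le_card hsubset
      rw [h1] at h2
      simpa using h2
    exact hball p (by omega) ⟨hp2, hpiter⟩

-- ===== VERDICT (by name: the statement is the Claim_ definition above) =====
theorem bacias_arvores_spec : Claim_equal_bacias_arvores := by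
  intro lista raiz _ hpre
  unfold Spec_bacias_arvores bacias_arvores bacias_arvores_alt
  exact pvGo_eq lista (lista.length + 2) raiz (pvPre_noCyc lista raiz hpre)
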